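-- pv_equiv track=rewrite | github.com/AB0204/Team_OOAD23 | Analysis/generate_diagrams.py | encode64
-- ===== SOURCE A (Python) =====
-- import string
--
-- def encode64(data):
--     _b64 = string.digits + string.ascii_uppercase + string.ascii_lowercase + '-_'
--     r = ""
--     for i in range(0, len(data), 3):
--         if i + 2 == len(data):
--             r += append3bytes(data[i], data[i+1], 0)
--         elif i + 1 == len(data):
--             r += append3bytes(data[i], 0, 0)
--         else:
--             r += append3bytes(data[i], data[i+1], data[i+2])
--     return r
--
-- def append3bytes(b1, b2, b3):
--     _b64 = string.digits + string.ascii_uppercase + string.ascii_lowercase + '-_'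
--     c1 = b1 >> 2
--     c2 = ((b1 & 0x3) << 4) | (b2 >> 4)
--     c3 = ((b2 & 0xF) << 2) | (b3 >> 6)
--     c4 = b3 & 0x3F
--     r = ""
--     r += _b64[c1 & 0x3F]
--     r += _b64[c2 & 0x3F]
--     r += _b64[c3 & 0x3F]
--     r += _b64[c4 & 0x3F]
--     return r
-- ===== SOURCE B (Python) =====
-- import string
--
-- def encode64(data):
--     # Bit-stream re-implementation: flatten the bytes into one bit string,
--     # zero-pad to a multiple of 24 bits (A pads each final group with zero
--     # bytes), then emit one alphabet character per 6-bit slice.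
--     _b64 = string.digits + string.ascii_uppercase + string.ascii_lowercase + '-_'
--     bits = ''.join(format(b & 0xFF, '08b') for b in data)
--     bits += '0' * (-len(bits) % 24)
--     out = []
--     for i in range(0, len(bits), 6):
--         v = 0
--         for ch in bits[i:i + 6]:
--             v = 2 * v + (ch == '1')
--         out.append(_b64[v])
--     return ''.join(out)
-- ===== Notes on version B (the rewrite author's own statement) =====
-- stated objective: alternative
-- what changed: Replaces A's per-3-byte-group branch logic with cross-byte shift/mask/OR arithmetic by a flat bit-stream encoder: concatenate the 8-bit renderings of all bytes, zero-pad to a multiple of 24 bits, and map each 6-bit slice to an alphabet character.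
-- outside the precondition, e.g. on encode64([0, 256]): A returns '0G00', B returns '0000'; on encode64([0, -1, 0]): A returns '0_y0', B returns '0Fy0'
import Mathlib
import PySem

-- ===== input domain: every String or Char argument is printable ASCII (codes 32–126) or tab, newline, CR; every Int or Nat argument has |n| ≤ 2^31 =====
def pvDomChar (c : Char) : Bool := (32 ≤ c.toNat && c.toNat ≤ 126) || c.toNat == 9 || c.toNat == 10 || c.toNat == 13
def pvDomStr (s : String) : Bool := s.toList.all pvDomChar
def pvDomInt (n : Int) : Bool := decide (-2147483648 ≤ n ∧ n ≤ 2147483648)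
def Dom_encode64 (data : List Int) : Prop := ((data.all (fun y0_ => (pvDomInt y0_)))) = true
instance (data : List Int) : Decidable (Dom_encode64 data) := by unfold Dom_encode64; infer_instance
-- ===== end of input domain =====

-- B re-encodes via a flat bit stream (8 bits per byte, zero-padded to 24, read in 6-bit slices)
-- instead of A's per-3-byte-group shift/mask/OR arithmetic; equal on byte inputs (Pre_ below).


-- ===== PORT A =====
def pvB64 : String := "0123456789ABCDEFGHIJKLMNOPQRSTUVWXYZabcdefghijklmnopqrstuvwxyz-_"

-- Python's `>>`/`<<` are Lean's `>>>`/`<<<` on Int, `&`/`|` are PySem.Int.band/bor (Python-exact).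
-- `_b64[c & 0x3F]`: the masked index is always in [0, 64), so `.getD ' '` is unreachable.
def append3bytes (b1 b2 b3 : Int) : String :=
  let c1 : Int := b1 >>> (2 : Nat)
  let c2 : Int := PySem.Int.bor ((PySem.Int.band b1 0x3) <<< (4 : Nat)) (b2 >>> (4 : Nat))
  let c3 : Int := PySem.Int.bor ((PySem.Int.band b2 0xF) <<< (2 : Nat)) (b3 >>> (6 : Nat))
  let c4 : Int := PySem.Int.band b3 0x3F
  let r : String := ""
  let r := r.push ((PySem.Str.pyGet? pvB64 (PySem.Int.band c1 0x3F)).getD ' ')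
  let r := r.push ((PySem.Str.pyGet? pvB64 (PySem.Int.band c2 0x3F)).getD ' ')
  let r := r.push ((PySem.Str.pyGet? pvB64 (PySem.Int.band c3 0x3F)).getD ' ')
  let r := r.push ((PySem.Str.pyGet? pvB64 (PySem.Int.band c4 0x3F)).getD ' ')
  r

-- A's loop walks i = 0, 3, 6, … and branches on how many elements remain past i;
-- ported as the obvious structural recursion on the remaining suffix, same branch order.
def encode64 : List Int → String
  | [b1, b2] => append3bytes b1 b2 0
  | [b1] => append3bytes b1 0 0
  | b1 :: b2 :: b3 :: rest => append3bytes b1 b2 b3 ++ encode64 rest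
  | [] => ""

-- ===== PORT B =====
-- format(m, '08b') for 0 ≤ m < 256: the 8 binary digits of m, most significant first
-- (hand-ported, exact on that range; B masks its argument with 0xFF first).
def pvNatBits : Nat → Nat → List Char
  | 0, _ => []
  | k + 1, n => pvNatBits k (n / 2) ++ [if n % 2 = 1 then '1' else '0']

def pvBits8 (b : Int) : List Char := pvNatBits 8 (PySem.Int.band b 0xFF).toNat

-- the inner loop `v = 2 * v + (ch == '1')` over a 6-bit slice
def pvVal (cs : List Char) : Nat :=
  cs.foldl (fun v ch => 2 * v + (if ch = '1' then 1 else 0)) 0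

-- the loop `for i in range(0, len(bits), 6)`: each step reads bits[i:i+6] and moves past it
def pvEncodeBits : List Char → List Char
  | [] => []
  | b :: rest =>
      pvB64.toList.getD (pvVal ((b :: rest).take 6)) ' ' :: pvEncodeBits (rest.drop 5)
  termination_by cs => cs.length
  decreasing_by simp

def encode64_alt (data : List Int) : String :=
  let bits := data.flatMap pvBits8
  let bits := bits ++ List.replicate (PySem.Int.mod (-(bits.length : Int)) 24).toNat '0'
  String.ofList (pvEncodeBits bits)

-- ===== PRECONDITION & SPEC =====
-- Pre_ restricts to the encoder's natural domain, byte values 0..255. A also accepts other ints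
-- (it never raises) but there its `|` of shifted neighbouring values leaks bits 8-9 of a value
-- into the previous output character — an artefact of its group arithmetic that no byte encoder
-- would specify; B reads each value's low 8 bits instead.
def Pre_encode64 (data : List Int) : Prop := ∀ b ∈ data, 0 ≤ b ∧ b < 256
instance (data : List Int) : Decidable (Pre_encode64 data) := by unfold Pre_encode64; infer_instance
def pvWitness_encode64 : List Int := [77, 97, 110, 255, 0]

def Spec_encode64 (data : List Int) (out : String) : Prop := out = encode64_alt data
instance (data : List Int) (out : String) : Decidable (Spec_encode64 data out) := by
  unfold Spec_encode64; infer_instance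

-- ===== CLAIM (what is proved, stated in full; the proofs are below) =====
def Claim_equal_encode64 : Prop :=
  ∀ (data : List Int), Dom_encode64 data → Pre_encode64 data → Spec_encode64 data (encode64 data)

-- ===== LEMMAS AND PROOFS =====

theorem pvNatBits_length (k n : Nat) : (pvNatBits k n).length = k := by
  induction k generalizing n with
  | zero => simp [pvNatBits]
  | succ k ih => simp [pvNatBits, ih]

theorem pvNatBits_join (j k x y : Nat) (hy : y < 2 ^ k) :
    pvNatBits j x ++ pvNatBits k y = pvNatBits (j + k) (x * 2 ^ k + y) := by
  induction k generalizing y with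
  | zero =>
      have : y = 0 := by omega
      subst this; simp [pvNatBits]
  | succ k ih =>
      have hp : 2 ^ (k + 1) = 2 ^ k * 2 := pow_succ 2 k
      have h2 : y / 2 < 2 ^ k := by omega
      have e0 : x * 2 ^ (k + 1) + y = 2 * (x * 2 ^ k) + y := by rw [hp]; ring
      have e1 : (x * 2 ^ (k + 1) + y) / 2 = x * 2 ^ k + y / 2 := by omega
      have e2 : (x * 2 ^ (k + 1) + y) % 2 = y % 2 := by omega
      calc pvNatBits j x ++ pvNatBits (k + 1) y
          = (pvNatBits j x ++ pvNatBits k (y / 2)) ++ [if y % 2 = 1 then '1' else '0'] := by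
            simp [pvNatBits]
        _ = pvNatBits (j + k) (x * 2 ^ k + y / 2) ++ [if y % 2 = 1 then '1' else '0'] := by
            rw [ih _ h2]
        _ = pvNatBits (j + (k + 1)) (x * 2 ^ (k + 1) + y) := by
            rw [show j + (k + 1) = (j + k) + 1 from rfl]
            simp [pvNatBits, e1, e2]

theorem pvVal_pvNatBits (k n : Nat) : pvVal (pvNatBits k n) = n % 2 ^ k := by
  induction k generalizing n with
  | zero => simp [pvNatBits, pvVal, Nat.mod_one]
  | succ k ih =>
      have h0 : pvVal (pvNatBits (k + 1) n)
          = 2 * pvVal (pvNatBits k (n / 2))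
            + (if (if n % 2 = 1 then '1' else '0') = '1' then 1 else 0) := by
        simp [pvNatBits, pvVal, List.foldl_append]
      have hm : n % (2 * 2 ^ k) = n % 2 + 2 * (n / 2 % 2 ^ k) := Nat.mod_mul
      have hp : 2 ^ (k + 1) = 2 * 2 ^ k := by rw [pow_succ]; ring
      rw [h0, ih, hp]
      rcases Nat.mod_two_eq_zero_or_one n with h | h <;> simp [h] <;> omega

theorem encodeBits_chunk (xs ys : List Char) (h : xs.length = 6) :
    pvEncodeBits (xs ++ ys) = pvB64.toList.getD (pvVal xs) ' ' :: pvEncodeBits ys := by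
  obtain ⟨a, b, c, d, e, f, rfl⟩ : ∃ a b c d e f, xs = [a, b, c, d, e, f] := by
    rcases xs with _ | ⟨a, _ | ⟨b, _ | ⟨c, _ | ⟨d, _ | ⟨e, _ | ⟨f, _ | ⟨g, t⟩⟩⟩⟩⟩⟩⟩ <;>
      simp_all
  rw [show ([a, b, c, d, e, f] : List Char) ++ ys = a :: b :: c :: d :: e :: f :: ys from rfl,
    pvEncodeBits]
  simp

theorem encode_NB6 (v : Nat) (ys : List Char) :
    pvEncodeBits (pvNatBits 6 v ++ ys) = pvB64.toList.getD (v % 64) ' ' :: pvEncodeBits ys := by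
  rw [encodeBits_chunk _ _ (pvNatBits_length 6 v), pvVal_pvNatBits]
  norm_num

theorem chunk24 (a b c : Nat) (ha : a < 256) (hb : b < 256) (hc : c < 256) (ys : List Char) :
    pvEncodeBits (pvNatBits 8 a ++ (pvNatBits 8 b ++ (pvNatBits 8 c ++ ys))) =
      pvB64.toList.getD (a / 4) ' ' :: pvB64.toList.getD ((a % 4) * 16 + b / 16) ' ' ::
      pvB64.toList.getD ((b % 16) * 4 + c / 64) ' ' :: pvB64.toList.getD (c % 64) ' ' ::
      pvEncodeBits ys := by
  have s1 : pvNatBits 8 a = pvNatBits 6 (a / 4) ++ pvNatBits 2 (a % 4) := by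
    rw [pvNatBits_join 6 2 (a / 4) (a % 4) (by norm_num; omega)]
    norm_num
    congr 1
    omega
  have s2 : pvNatBits 8 b = pvNatBits 4 (b / 16) ++ pvNatBits 4 (b % 16) := by
    rw [pvNatBits_join 4 4 (b / 16) (b % 16) (by norm_num; omega)]
    norm_num
    congr 1
    omega
  have s3 : pvNatBits 8 c = pvNatBits 2 (c / 64) ++ pvNatBits 6 (c % 64) := by
    rw [pvNatBits_join 2 6 (c / 64) (c % 64) (by norm_num; omega)]
    norm_num
    congr 1
    omega
  have j1 : pvNatBits 2 (a % 4) ++ pvNatBits 4 (b / 16)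
      = pvNatBits 6 ((a % 4) * 16 + b / 16) := by
    rw [pvNatBits_join 2 4 (a % 4) (b / 16) (by norm_num; omega)]
    norm_num
  have j2 : pvNatBits 4 (b % 16) ++ pvNatBits 2 (c / 64)
      = pvNatBits 6 ((b % 16) * 4 + c / 64) := by
    rw [pvNatBits_join 4 2 (b % 16) (c / 64) (by norm_num; omega)]
    norm_num
  have key : pvNatBits 8 a ++ (pvNatBits 8 b ++ (pvNatBits 8 c ++ ys))
      = pvNatBits 6 (a / 4) ++ (pvNatBits 6 ((a % 4) * 16 + b / 16)
        ++ (pvNatBits 6 ((b % 16) * 4 + c / 64) ++ (pvNatBits 6 (c % 64) ++ ys))) := by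
    rw [s1, s2, s3]
    simp only [List.append_assoc]
    rw [← List.append_assoc (pvNatBits 2 (a % 4)) (pvNatBits 4 (b / 16)), j1,
      ← List.append_assoc (pvNatBits 4 (b % 16)) (pvNatBits 2 (c / 64)), j2]
  rw [key, encode_NB6, encode_NB6, encode_NB6, encode_NB6,
    Nat.mod_eq_of_lt (show a / 4 < 64 by omega),
    Nat.mod_eq_of_lt (show (a % 4) * 16 + b / 16 < 64 by omega),
    Nat.mod_eq_of_lt (show (b % 16) * 4 + c / 64 < 64 by omega),
    Nat.mod_eq_of_lt (show c % 64 < 64 by omega)]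

set_option maxRecDepth 8192 in
theorem pv_and255 : ∀ m, m < 256 → m &&& 255 = m := by decide

set_option maxRecDepth 8192 in
theorem pv_shr2 : ∀ m, m < 256 → (m >>> 2) &&& 63 = m / 4 := by decide

set_option maxRecDepth 8192 in
theorem pv_and3 : ∀ m, m < 256 → m &&& 3 = m % 4 := by decide

set_option maxRecDepth 8192 in
theorem pv_shr4 : ∀ m, m < 256 → m >>> 4 = m / 16 := by decide

set_option maxRecDepth 8192 in
theorem pv_and15 : ∀ m, m < 256 → m &&& 15 = m % 16 := by decide

set_option maxRecDepth 8192 in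
theorem pv_shr6 : ∀ m, m < 256 → m >>> 6 = m / 64 := by decide

set_option maxRecDepth 8192 in
theorem pv_and63 : ∀ m, m < 256 → m &&& 63 = m % 64 := by decide

theorem pv_or16 : ∀ u, u < 4 → ∀ w, w < 16 → ((u <<< 4) ||| w) &&& 63 = u * 16 + w := by decide

theorem pv_or4 : ∀ u, u < 16 → ∀ w, w < 4 → ((u <<< 2) ||| w) &&& 63 = u * 4 + w := by decide

theorem bits8_byte (a : Nat) (ha : a < 256) : pvBits8 (a : Int) = pvNatBits 8 a := by
  unfold pvBits8
  have h1 : PySem.Int.band (a : Int) 0xFF = ((a &&& 255 : Nat) : Int) := by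
    exact_mod_cast PySem.Int.band_natCast a 255
  rw [h1, pv_and255 a ha]
  simp

theorem append3_toList (a b c : Nat) (ha : a < 256) (hb : b < 256) (hc : c < 256) :
    (append3bytes (a : Int) (b : Int) (c : Int)).toList =
      [pvB64.toList.getD (a / 4) ' ', pvB64.toList.getD ((a % 4) * 16 + b / 16) ' ',
       pvB64.toList.getD ((b % 16) * 4 + c / 64) ' ', pvB64.toList.getD (c % 64) ' '] := by
  have i1 : PySem.Int.band ((a : Int) >>> (2 : Nat)) 0x3F = ((a / 4 : Nat) : Int) := by
    rw [show ((a : Int) >>> (2 : Nat)) = ((a >>> 2 : Nat) : Int) by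
      exact_mod_cast Int.natCast_shiftRight a 2]
    rw [show PySem.Int.band ((a >>> 2 : Nat) : Int) 0x3F = (((a >>> 2) &&& 63 : Nat) : Int) by
      exact_mod_cast PySem.Int.band_natCast (a >>> 2) 63]
    rw [pv_shr2 a ha]
  have i2 : PySem.Int.band
      (PySem.Int.bor ((PySem.Int.band (a : Int) 0x3) <<< (4 : Nat)) ((b : Int) >>> (4 : Nat))) 0x3F
      = (((a % 4) * 16 + b / 16 : Nat) : Int) := by
    rw [show PySem.Int.band (a : Int) 0x3 = ((a &&& 3 : Nat) : Int) by
      exact_mod_cast PySem.Int.band_natCast a 3]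
    rw [show (((a &&& 3 : Nat) : Int)) <<< (4 : Nat) = (((a &&& 3) <<< 4 : Nat) : Int) by
      exact_mod_cast Int.natCast_shiftLeft (a &&& 3) 4]
    rw [show ((b : Int) >>> (4 : Nat)) = ((b >>> 4 : Nat) : Int) by
      exact_mod_cast Int.natCast_shiftRight b 4]
    rw [show PySem.Int.bor (((a &&& 3) <<< 4 : Nat) : Int) ((b >>> 4 : Nat) : Int)
        = ((((a &&& 3) <<< 4) ||| (b >>> 4) : Nat) : Int) from PySem.Int.bor_natCast _ _]
    rw [show PySem.Int.band ((((a &&& 3) <<< 4) ||| (b >>> 4) : Nat) : Int) 0x3F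
        = (((((a &&& 3) <<< 4) ||| (b >>> 4)) &&& 63 : Nat) : Int) by
      exact_mod_cast PySem.Int.band_natCast _ 63]
    rw [pv_and3 a ha, pv_shr4 b hb, pv_or16 (a % 4) (by omega) (b / 16) (by omega)]
  have i3 : PySem.Int.band
      (PySem.Int.bor ((PySem.Int.band (b : Int) 0xF) <<< (2 : Nat)) ((c : Int) >>> (6 : Nat))) 0x3F
      = (((b % 16) * 4 + c / 64 : Nat) : Int) := by
    rw [show PySem.Int.band (b : Int) 0xF = ((b &&& 15 : Nat) : Int) by
      exact_mod_cast PySem.Int.band_natCast b 15]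
    rw [show (((b &&& 15 : Nat) : Int)) <<< (2 : Nat) = (((b &&& 15) <<< 2 : Nat) : Int) by
      exact_mod_cast Int.natCast_shiftLeft (b &&& 15) 2]
    rw [show ((c : Int) >>> (6 : Nat)) = ((c >>> 6 : Nat) : Int) by
      exact_mod_cast Int.natCast_shiftRight c 6]
    rw [show PySem.Int.bor (((b &&& 15) <<< 2 : Nat) : Int) ((c >>> 6 : Nat) : Int)
        = ((((b &&& 15) <<< 2) ||| (c >>> 6) : Nat) : Int) from PySem.Int.bor_natCast _ _]
    rw [show PySem.Int.band ((((b &&& 15) <<< 2) ||| (c >>> 6) : Nat) : Int) 0x3F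
        = (((((b &&& 15) <<< 2) ||| (c >>> 6)) &&& 63 : Nat) : Int) by
      exact_mod_cast PySem.Int.band_natCast _ 63]
    rw [pv_and15 b hb, pv_shr6 c hc, pv_or4 (b % 16) (by omega) (c / 64) (by omega)]
  have i4 : PySem.Int.band (c : Int) 0x3F = ((c % 64 : Nat) : Int) := by
    rw [show PySem.Int.band (c : Int) 0x3F = ((c &&& 63 : Nat) : Int) by
      exact_mod_cast PySem.Int.band_natCast c 63]
    rw [pv_and63 c hc]
  have i5 : PySem.Int.band ((c % 64 : Nat) : Int) 0x3F = ((c % 64 : Nat) : Int) := by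
    rw [show PySem.Int.band ((c % 64 : Nat) : Int) 0x3F = (((c % 64) &&& 63 : Nat) : Int) by
      exact_mod_cast PySem.Int.band_natCast (c % 64) 63]
    rw [pv_and63 (c % 64) (by omega)]
    exact_mod_cast congrArg (fun m : Nat => (m : Int)) (by omega : c % 64 % 64 = c % 64)
  simp only [append3bytes, i1, i2, i3, i4, i5, String.toList_push]
  simp only [PySem.Str.pyGet?_natCast, List.getD_eq_getElem?_getD]
  simp

theorem pvBits8_length (x : Int) : (pvBits8 x).length = 8 := by
  simp [pvBits8, pvNatBits_length]

theorem alt_def (data : List Int) :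
    encode64_alt data = String.ofList (pvEncodeBits (data.flatMap pvBits8 ++
      List.replicate (PySem.Int.mod (-(((data.flatMap pvBits8).length : Nat) : Int)) 24).toNat '0')) := by
  simp [encode64_alt]

theorem chunkIntN (a b c : Nat) (ha : a < 256) (hb : b < 256) (hc : c < 256) (ys : List Char) :
    pvEncodeBits (pvBits8 (a : Int) ++ (pvBits8 (b : Int) ++ (pvBits8 (c : Int) ++ ys)))
      = (append3bytes (a : Int) (b : Int) (c : Int)).toList ++ pvEncodeBits ys := by
  rw [bits8_byte a ha, bits8_byte b hb, bits8_byte c hc, chunk24 a b c ha hb hc ys,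
    append3_toList a b c ha hb hc]
  rfl

theorem chunkIntN3 (a b c : Nat) (ha : a < 256) (hb : b < 256) (hc : c < 256) :
    pvEncodeBits (pvBits8 (a : Int) ++ (pvBits8 (b : Int) ++ pvBits8 (c : Int)))
      = (append3bytes (a : Int) (b : Int) (c : Int)).toList := by
  have h := chunkIntN a b c ha hb hc []
  simpa [pvEncodeBits] using h

theorem pad_cons3 (L : Nat) :
    (PySem.Int.mod (-(((24 + L : Nat) : Int))) 24).toNat
      = (PySem.Int.mod (-((L : Nat) : Int)) 24).toNat := by
  rw [PySem.Int.mod_eq_emod_of_pos (by norm_num), PySem.Int.mod_eq_emod_of_pos (by norm_num)]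
  push_cast
  omega

theorem encode_eq (data : List Int) : Pre_encode64 data → encode64 data = encode64_alt data := by
  induction data using encode64.induct with
  | case1 b1 b2 =>
      intro hpre
      obtain ⟨h1, h1'⟩ := hpre b1 (by simp)
      obtain ⟨h2, h2'⟩ := hpre b2 (by simp)
      obtain ⟨a, rfl⟩ : ∃ a : Nat, b1 = (a : Int) := ⟨b1.toNat, (Int.toNat_of_nonneg h1).symm⟩
      obtain ⟨b, rfl⟩ : ∃ b : Nat, b2 = (b : Int) := ⟨b2.toNat, (Int.toNat_of_nonneg h2).symm⟩
      have ha : a < 256 := by omega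
      have hb : b < 256 := by omega
      rw [alt_def]
      have hf : ([(a : Int), (b : Int)] : List Int).flatMap pvBits8
          = pvBits8 (a : Int) ++ (pvBits8 (b : Int) ++ []) := by simp
      rw [hf]
      have hlen : (pvBits8 (a : Int) ++ (pvBits8 (b : Int) ++ [])).length = 16 := by
        simp [pvBits8_length]
      have hpad : List.replicate
          (PySem.Int.mod (-(((pvBits8 (a : Int) ++ (pvBits8 (b : Int) ++ [])).length : Nat) : Int)) 24).toNat '0'
          = pvBits8 ((0 : Nat) : Int) := by
        rw [hlen]; decide
      rw [hpad]
      have hshape : (pvBits8 (a : Int) ++ (pvBits8 (b : Int) ++ [])) ++ pvBits8 ((0 : Nat) : Int)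
          = pvBits8 (a : Int) ++ (pvBits8 (b : Int) ++ pvBits8 ((0 : Nat) : Int)) := by
        simp
      rw [hshape, chunkIntN3 a b 0 ha hb (by omega), String.ofList_toList]
      simp [encode64]
  | case2 b1 =>
      intro hpre
      obtain ⟨h1, h1'⟩ := hpre b1 (by simp)
      obtain ⟨a, rfl⟩ : ∃ a : Nat, b1 = (a : Int) := ⟨b1.toNat, (Int.toNat_of_nonneg h1).symm⟩
      have ha : a < 256 := by omega
      rw [alt_def]
      have hf : ([(a : Int)] : List Int).flatMap pvBits8 = pvBits8 (a : Int) ++ [] := by simp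
      rw [hf]
      have hlen : (pvBits8 (a : Int) ++ []).length = 8 := by simp [pvBits8_length]
      have hpad : List.replicate
          (PySem.Int.mod (-(((pvBits8 (a : Int) ++ []).length : Nat) : Int)) 24).toNat '0'
          = pvBits8 ((0 : Nat) : Int) ++ pvBits8 ((0 : Nat) : Int) := by
        rw [hlen]; decide
      rw [hpad]
      have hshape : (pvBits8 (a : Int) ++ []) ++ (pvBits8 ((0 : Nat) : Int) ++ pvBits8 ((0 : Nat) : Int))
          = pvBits8 (a : Int) ++ (pvBits8 ((0 : Nat) : Int) ++ pvBits8 ((0 : Nat) : Int)) := by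
        simp
      rw [hshape, chunkIntN3 a 0 0 ha (by omega) (by omega), String.ofList_toList]
      simp [encode64]
  | case3 b1 b2 b3 rest ih =>
      intro hpre
      obtain ⟨h1, h1'⟩ := hpre b1 (by simp)
      obtain ⟨h2, h2'⟩ := hpre b2 (by simp)
      obtain ⟨h3, h3'⟩ := hpre b3 (by simp)
      obtain ⟨a, rfl⟩ : ∃ a : Nat, b1 = (a : Int) := ⟨b1.toNat, (Int.toNat_of_nonneg h1).symm⟩
      obtain ⟨b, rfl⟩ : ∃ b : Nat, b2 = (b : Int) := ⟨b2.toNat, (Int.toNat_of_nonneg h2).symm⟩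
      obtain ⟨c, rfl⟩ : ∃ c : Nat, b3 = (c : Int) := ⟨b3.toNat, (Int.toNat_of_nonneg h3).symm⟩
      have ha : a < 256 := by omega
      have hb : b < 256 := by omega
      have hc : c < 256 := by omega
      have hrest : Pre_encode64 rest := fun x hx => hpre x (by simp [hx])
      have ihe := ih hrest
      simp only [encode64]
      rw [alt_def]
      have hf : ((a : Int) :: (b : Int) :: (c : Int) :: rest).flatMap pvBits8
          = pvBits8 (a : Int) ++ (pvBits8 (b : Int) ++ (pvBits8 (c : Int) ++ rest.flatMap pvBits8)) := by
        simp
      rw [hf]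
      have hlen : (pvBits8 (a : Int) ++ (pvBits8 (b : Int) ++ (pvBits8 (c : Int) ++ rest.flatMap pvBits8))).length
          = 24 + (rest.flatMap pvBits8).length := by
        simp [pvBits8_length]
        omega
      rw [hlen, pad_cons3]
      simp only [List.append_assoc]
      rw [chunkIntN a b c ha hb hc _, String.ofList_append, String.ofList_toList, ihe, alt_def]
  | case4 =>
      intro _
      rw [alt_def]
      have h0 : (PySem.Int.mod (-((((([] : List Int).flatMap pvBits8).length : Nat)) : Int)) 24).toNat
          = 0 := by decide
      rw [h0]
      simp [encode64, pvEncodeBits]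

-- ===== VERDICT (by name: the statement is the Claim_ definition above) =====
theorem encode64_spec : Claim_equal_encode64 := by
  intro data _ hpre
  unfold Spec_encode64
  exact encode_eq data hpre
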